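-- pv_equiv track=rewrite | github.com/TTungMaverix/A-Multi-Camera-System-for-Detecting-and-Tracking-Strangers-Entering-a-Facility | insightface_demo_assets/runtime/run_new_dataset_pair_debug.py | _failure_frame_indices
-- ===== SOURCE A (Python) =====
-- def _failure_frame_indices(render_rows, track_summaries):
--     indices = set()
--     if render_rows:
--         indices.add(0)
--         indices.add(len(render_rows) - 1)
--     for track_summary in track_summaries:
--         anchor = track_summary.get("selected_anchor", {}) or {}
--         anchor_frame = int(anchor.get("source_frame_id_actual", -1) or -1)
--         if anchor_frame < 0:
--             continue
--         for index, item in enumerate(render_rows):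
--             row = item["record"]
--             if int(float(row.get("source_frame_id_actual", row.get("frame_id", 0)) or 0)) == anchor_frame:
--                 indices.add(index)
--                 break
--     return sorted(indices)
-- ===== SOURCE B (Python) =====
-- def _failure_frame_indices(render_rows, track_summaries):
--     anchors = set()
--     for track_summary in track_summaries:
--         anchor = track_summary.get("selected_anchor", {}) or {}
--         anchor_frame = int(anchor.get("source_frame_id_actual", -1) or -1)
--         if anchor_frame >= 0:
--             anchors.add(anchor_frame)
--     indices = set()
--     if render_rows:
--         indices.add(0)
--         indices.add(len(render_rows) - 1)
--     if anchors:
--         for index, item in enumerate(render_rows):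
--             row = item["record"]
--             frame = int(float(row.get("source_frame_id_actual", row.get("frame_id", 0)) or 0))
--             if frame in anchors:
--                 indices.add(index)
--                 anchors.remove(frame)
--                 if not anchors:
--                     break
--     return sorted(indices)
-- ===== Notes on version B (the rewrite author's own statement) =====
-- stated objective: alternative
-- what changed: A scans render_rows once per valid track anchor (nested loops); B collects the valid anchor frames into a set first and then makes a single pass over render_rows, recording the first occurrence of each remaining anchor frame and stopping once all are matched.
import Mathlib
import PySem

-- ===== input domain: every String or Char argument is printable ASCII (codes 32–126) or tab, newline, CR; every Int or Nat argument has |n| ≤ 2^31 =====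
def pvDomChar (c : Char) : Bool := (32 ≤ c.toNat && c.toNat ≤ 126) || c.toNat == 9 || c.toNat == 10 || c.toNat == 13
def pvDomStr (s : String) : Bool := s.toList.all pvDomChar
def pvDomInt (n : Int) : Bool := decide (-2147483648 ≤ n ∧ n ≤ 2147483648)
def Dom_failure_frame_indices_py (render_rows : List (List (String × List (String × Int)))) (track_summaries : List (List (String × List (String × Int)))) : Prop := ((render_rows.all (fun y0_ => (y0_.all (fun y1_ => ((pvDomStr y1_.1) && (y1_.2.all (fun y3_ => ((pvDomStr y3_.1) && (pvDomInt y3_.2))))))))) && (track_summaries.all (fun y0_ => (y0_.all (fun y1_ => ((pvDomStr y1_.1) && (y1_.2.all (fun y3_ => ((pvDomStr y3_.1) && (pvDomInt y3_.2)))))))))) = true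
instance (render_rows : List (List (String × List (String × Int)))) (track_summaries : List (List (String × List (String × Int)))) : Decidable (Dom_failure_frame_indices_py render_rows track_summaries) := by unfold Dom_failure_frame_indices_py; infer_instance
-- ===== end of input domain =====

-- B replaces A's per-anchor rescans of render_rows (nested loops) by one pass over
-- render_rows against a precomputed set of valid anchor frames (objective: alternative).

-- ===== PORT A =====
-- anchor = track.get("selected_anchor", {}) or {}; int(anchor.get("source_frame_id_actual", -1) or -1)
-- (int(v) on an int is the identity; 'v or -1' maps 0 to -1)
def pvAnchorFrame (track : List (String × List (String × Int))) : Int :=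
  let anchor : List (String × Int) :=
    match PySem.Dict.get? (PySem.Dict.mk track) "selected_anchor" with
    | some a => if a = [] then [] else a      -- '… or {}'
    | none => []
  let v := PySem.Dict.getD (PySem.Dict.mk anchor) "source_frame_id_actual" (-1)
  if v = 0 then -1 else v                     -- 'int(v or -1)'

-- int(float(row.get("source_frame_id_actual", row.get("frame_id", 0)) or 0));
-- int(float(v)) = v and 'v or 0' = v on ints with |v| ≤ 2^31 (inside Dom_)
def pvRowFrame (item : List (String × List (String × Int))) : Int :=
  let row := PySem.Dict.getD (PySem.Dict.mk item) "record" []   -- item["record"]: KeyError when absent — total here, exact under Pre_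
  let v := PySem.Dict.getD (PySem.Dict.mk row) "source_frame_id_actual" (PySem.Dict.getD (PySem.Dict.mk row) "frame_id" 0)
  if v = 0 then 0 else v                        -- '… or 0'

-- A's inner 'for index, item in enumerate(render_rows): … break'
def pvFirstMatchA (rows : List (List (String × List (String × Int)))) (anchor_frame : Int) (index : Int) : Option Int :=
  match rows with
  | [] => none
  | item :: rest =>
      if pvRowFrame item = anchor_frame then some index
      else pvFirstMatchA rest anchor_frame (index + 1)

def failure_frame_indices_py (render_rows : List (List (String × List (String × Int)))) (track_summaries : List (List (String × List (String × Int)))) : List Int :=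
  let indices : PySem.Set Int :=
    if render_rows = [] then PySem.Set.empty
    else PySem.Set.add (PySem.Set.add PySem.Set.empty 0) (PySem.List.len render_rows - 1)
  let indices := track_summaries.foldl (fun acc track_summary =>
    let anchor_frame := pvAnchorFrame track_summary
    if anchor_frame < 0 then acc
    else
      match pvFirstMatchA render_rows anchor_frame 0 with
      | some index => PySem.Set.add acc index
      | none => acc) indices
  PySem.List.sorted indices (fun x => x) false

-- ===== PORT B =====
-- B's single pass: record the first occurrence of each remaining anchor frame,
-- removing it from the set; break when no anchor frames remain.
def pvScanB (rows : List (List (String × List (String × Int)))) (anchors indices : PySem.Set Int) (index : Int) : PySem.Set Int :=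
  match rows with
  | [] => indices
  | item :: rest =>
      let frame := pvRowFrame item
      if PySem.Set.contains anchors frame then
        let indices := PySem.Set.add indices index
        let anchors := PySem.Set.discard anchors frame   -- anchors.remove(frame): present, so discard is exact
        if anchors = [] then indices                     -- 'if not anchors: break'
        else pvScanB rest anchors indices (index + 1)
      else pvScanB rest anchors indices (index + 1)

def failure_frame_indices_py_alt (render_rows : List (List (String × List (String × Int)))) (track_summaries : List (List (String × List (String × Int)))) : List Int :=
  let anchors : PySem.Set Int := track_summaries.foldl (fun s track_summary =>
    let anchor_frame := pvAnchorFrame track_summary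
    if anchor_frame ≥ 0 then PySem.Set.add s anchor_frame else s) PySem.Set.empty
  let indices : PySem.Set Int :=
    if render_rows = [] then PySem.Set.empty
    else PySem.Set.add (PySem.Set.add PySem.Set.empty 0) (PySem.List.len render_rows - 1)
  let indices := if anchors = [] then indices else pvScanB render_rows anchors indices 0
  PySem.List.sorted indices (fun x => x) false

-- ===== PRECONDITION & SPEC =====
-- Pre_ excludes inputs where some track has a valid anchor frame yet some render row
-- lacks the "record" key: there A's row access item["record"] can raise KeyError
-- (it is conservative: A still returns when every anchor matches before the bad row).
def Pre_failure_frame_indices_py (render_rows : List (List (String × List (String × Int)))) (track_summaries : List (List (String × List (String × Int)))) : Prop :=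
  (∃ t ∈ track_summaries, 0 ≤ pvAnchorFrame t) →
    ∀ item ∈ render_rows, (PySem.Dict.get? (PySem.Dict.mk item) "record").isSome
instance (render_rows : List (List (String × List (String × Int)))) (track_summaries : List (List (String × List (String × Int)))) : Decidable (Pre_failure_frame_indices_py render_rows track_summaries) := by unfold Pre_failure_frame_indices_py; infer_instance

def pvWitness_failure_frame_indices_py : (List (List (String × List (String × Int)))) × (List (List (String × List (String × Int)))) :=
  ([[("record", [("frame_id", 3)])], [("record", [("source_frame_id_actual", 3)])]],
   [[("selected_anchor", [("source_frame_id_actual", 3)])], []])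

def Spec_failure_frame_indices_py (render_rows : List (List (String × List (String × Int)))) (track_summaries : List (List (String × List (String × Int)))) (out : List Int) : Prop := out = failure_frame_indices_py_alt render_rows track_summaries
instance (render_rows : List (List (String × List (String × Int)))) (track_summaries : List (List (String × List (String × Int)))) (out : List Int) : Decidable (Spec_failure_frame_indices_py render_rows track_summaries out) := by unfold Spec_failure_frame_indices_py; infer_instance

-- ===== CLAIM (what is proved, stated in full; the proofs are below) =====
def Claim_equal_failure_frame_indices_py : Prop := ∀ (render_rows : List (List (String × List (String × Int)))) (track_summaries : List (List (String × List (String × Int)))), Dom_failure_frame_indices_py render_rows track_summaries → Pre_failure_frame_indices_py render_rows track_summaries → Spec_failure_frame_indices_py render_rows track_summaries (failure_frame_indices_py render_rows track_summaries)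


-- ===== LEMMAS AND PROOFS =====

-- membership in A's fold over track_summaries
lemma pvA_fold_mem (rr ts : List (List (String × List (String × Int)))) (acc : PySem.Set Int) (x : Int) :
    (x ∈ ts.foldl (fun acc track_summary =>
      let anchor_frame := pvAnchorFrame track_summary
      if anchor_frame < 0 then acc
      else
        match pvFirstMatchA rr anchor_frame 0 with
        | some index => PySem.Set.add acc index
        | none => acc) acc)
    ↔ x ∈ acc ∨ ∃ t ∈ ts, ¬ pvAnchorFrame t < 0 ∧ pvFirstMatchA rr (pvAnchorFrame t) 0 = some x := by
  induction ts generalizing acc with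
  | nil => simp
  | cons t ts ih =>
    simp only [List.foldl_cons]
    rw [ih]
    by_cases h : pvAnchorFrame t < 0
    · simp only [h, if_pos, List.mem_cons]
      constructor
      · rintro (hx | ⟨t', ht', hc⟩)
        · exact Or.inl hx
        · exact Or.inr ⟨t', Or.inr ht', hc⟩
      · rintro (hx | ⟨t', (rfl | ht'), hc⟩)
        · exact Or.inl hx
        · exact absurd h hc.1
        · exact Or.inr ⟨t', ht', hc⟩
    · simp only [h, if_neg, not_false_iff]
      cases hm : pvFirstMatchA rr (pvAnchorFrame t) 0 with
      | none =>
        constructor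
        · rintro (hx | ⟨t', ht', hc⟩)
          · exact Or.inl hx
          · exact Or.inr ⟨t', List.mem_cons_of_mem _ ht', hc⟩
        · rintro (hx | ⟨t', ht', hc⟩)
          · exact Or.inl hx
          · rcases List.mem_cons.1 ht' with rfl | ht'
            · rw [hm] at hc; exact absurd hc.2 (by simp)
            · exact Or.inr ⟨t', ht', hc⟩
      | some i =>
        simp only [PySem.Set.mem_add]
        constructor
        · rintro ((hx | rfl) | ⟨t', ht', hc⟩)
          · exact Or.inl hx
          · exact Or.inr ⟨t, List.mem_cons_self .., h, hm⟩
          · exact Or.inr ⟨t', List.mem_cons_of_mem _ ht', hc⟩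
        · rintro (hx | ⟨t', ht', hc⟩)
          · exact Or.inl (Or.inl hx)
          · rcases List.mem_cons.1 ht' with rfl | ht'
            · rw [hm] at hc; exact Or.inl (Or.inr (Option.some_inj.1 hc.2).symm)
            · exact Or.inr ⟨t', ht', hc⟩

lemma pvA_fold_nodup (rr ts : List (List (String × List (String × Int)))) (acc : PySem.Set Int)
    (h : acc.Nodup) :
    (ts.foldl (fun acc track_summary =>
      let anchor_frame := pvAnchorFrame track_summary
      if anchor_frame < 0 then acc
      else
        match pvFirstMatchA rr anchor_frame 0 with
        | some index => PySem.Set.add acc index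
        | none => acc) acc).Nodup := by
  induction ts generalizing acc with
  | nil => exact h
  | cons t ts ih =>
    simp only [List.foldl_cons]
    apply ih
    by_cases hlt : pvAnchorFrame t < 0
    · simpa [hlt] using h
    · cases hm : pvFirstMatchA rr (pvAnchorFrame t) 0 with
      | none => simpa [hlt, hm] using h
      | some i => simpa [hlt, hm] using PySem.Set.nodup_add acc i h

-- membership in B's anchor-set fold
lemma pvB_anchors_mem (ts : List (List (String × List (String × Int)))) (s : PySem.Set Int) (f : Int) :
    (f ∈ ts.foldl (fun s track_summary =>
      let anchor_frame := pvAnchorFrame track_summary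
      if anchor_frame ≥ 0 then PySem.Set.add s anchor_frame else s) s)
    ↔ f ∈ s ∨ ∃ t ∈ ts, 0 ≤ pvAnchorFrame t ∧ pvAnchorFrame t = f := by
  induction ts generalizing s with
  | nil => simp
  | cons t ts ih =>
    simp only [List.foldl_cons]
    rw [ih]
    by_cases h : pvAnchorFrame t ≥ 0
    · simp only [h, if_pos, PySem.Set.mem_add]
      constructor
      · rintro ((hf | rfl) | ⟨t', ht', hc⟩)
        · exact Or.inl hf
        · exact Or.inr ⟨t, List.mem_cons_self .., h, rfl⟩
        · exact Or.inr ⟨t', List.mem_cons_of_mem _ ht', hc⟩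
      · rintro (hf | ⟨t', ht', hc⟩)
        · exact Or.inl (Or.inl hf)
        · rcases List.mem_cons.1 ht' with rfl | ht'
          · exact Or.inl (Or.inr hc.2.symm)
          · exact Or.inr ⟨t', ht', hc⟩
    · simp only [h, if_neg, not_false_iff]
      constructor
      · rintro (hf | ⟨t', ht', hc⟩)
        · exact Or.inl hf
        · exact Or.inr ⟨t', List.mem_cons_of_mem _ ht', hc⟩
      · rintro (hf | ⟨t', ht', hc⟩)
        · exact Or.inl hf
        · rcases List.mem_cons.1 ht' with rfl | ht'
          · exact absurd hc.1 h
          · exact Or.inr ⟨t', ht', hc⟩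

-- B's one-pass scan collects, for each remaining anchor frame, the index of its
-- first matching row (A's inner-loop result), starting at offset `idx`.
lemma pvScanB_mem (rows : List (List (String × List (String × Int))))
    (anchors indices : PySem.Set Int) (idx x : Int) :
    x ∈ pvScanB rows anchors indices idx
    ↔ x ∈ indices ∨ ∃ f ∈ anchors, pvFirstMatchA rows f idx = some x := by
  induction rows generalizing anchors indices idx with
  | nil => simp [pvScanB, pvFirstMatchA]
  | cons item rest ih =>
    simp only [pvScanB]
    by_cases hc : PySem.Set.contains anchors (pvRowFrame item) = true
    · have hg : pvRowFrame item ∈ anchors := (PySem.Set.contains_iff _ _).1 hc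
      simp only [hc, if_pos]
      by_cases hempty : PySem.Set.discard anchors (pvRowFrame item) = []
      · have hall : ∀ y ∈ anchors, y = pvRowFrame item := by
          intro y hy
          by_contra hne
          have : y ∈ PySem.Set.discard anchors (pvRowFrame item) :=
            (PySem.Set.mem_discard _ _ _).2 ⟨hy, hne⟩
          simp [hempty] at this
        simp only [hempty, if_pos, PySem.Set.mem_add]
        constructor
        · rintro (hx | rfl)
          · exact Or.inl hx
          · exact Or.inr ⟨pvRowFrame item, hg, by simp [pvFirstMatchA]⟩
        · rintro (hx | ⟨f, hf, hm⟩)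
          · exact Or.inl hx
          · rw [hall f hf] at hm
            simp only [pvFirstMatchA, if_pos] at hm
            exact Or.inr (Option.some_inj.1 hm).symm
      · simp only [hempty, if_neg, not_false_iff]
        rw [ih]
        simp only [PySem.Set.mem_add, PySem.Set.mem_discard]
        constructor
        · rintro ((hx | rfl) | ⟨f, ⟨hf, hne⟩, hm⟩)
          · exact Or.inl hx
          · exact Or.inr ⟨pvRowFrame item, hg, by simp [pvFirstMatchA]⟩
          · refine Or.inr ⟨f, hf, ?_⟩
            simp only [pvFirstMatchA]
            rw [if_neg (Ne.symm hne), hm]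
        · rintro (hx | ⟨f, hf, hm⟩)
          · exact Or.inl (Or.inl hx)
          · by_cases hfe : pvRowFrame item = f
            · subst hfe
              simp only [pvFirstMatchA, if_pos] at hm
              exact Or.inl (Or.inr (Option.some_inj.1 hm).symm)
            · refine Or.inr ⟨f, ⟨hf, fun h => hfe h.symm⟩, ?_⟩
              simpa only [pvFirstMatchA, if_neg hfe] using hm
    · have hg : pvRowFrame item ∉ anchors := fun h => hc ((PySem.Set.contains_iff _ _).2 h)
      simp only [hc, if_neg, Bool.false_eq_true, not_false_iff]
      rw [ih]
      constructor
      · rintro (hx | ⟨f, hf, hm⟩)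
        · exact Or.inl hx
        · refine Or.inr ⟨f, hf, ?_⟩
          have hne : pvRowFrame item ≠ f := fun h => hg (h ▸ hf)
          simp only [pvFirstMatchA, if_neg hne, hm]
      · rintro (hx | ⟨f, hf, hm⟩)
        · exact Or.inl hx
        · have hne : pvRowFrame item ≠ f := fun h => hg (h ▸ hf)
          refine Or.inr ⟨f, hf, ?_⟩
          simpa only [pvFirstMatchA, if_neg hne] using hm

lemma pvScanB_nodup (rows : List (List (String × List (String × Int))))
    (anchors indices : PySem.Set Int) (idx : Int) (h : indices.Nodup) :
    (pvScanB rows anchors indices idx).Nodup := by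
  induction rows generalizing anchors indices idx with
  | nil => exact h
  | cons item rest ih =>
    simp only [pvScanB]
    by_cases hc : PySem.Set.contains anchors (pvRowFrame item) = true
    · simp only [hc, if_pos]
      by_cases hempty : PySem.Set.discard anchors (pvRowFrame item) = []
      · simpa [hempty] using PySem.Set.nodup_add indices idx h
      · simpa [hempty] using ih _ _ _ (PySem.Set.nodup_add indices idx h)
    · simp only [hc, Bool.false_eq_true, if_neg, not_false_iff]
      exact ih _ _ _ h

-- the seed {0, len-1}
lemma pvSeed_nodup (rr : List (List (String × List (String × Int)))) :
    (if rr = [] then (PySem.Set.empty : PySem.Set Int)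
     else PySem.Set.add (PySem.Set.add PySem.Set.empty 0) (PySem.List.len rr - 1)).Nodup := by
  split
  · exact List.nodup_nil
  · exact PySem.Set.nodup_add _ _ (PySem.Set.nodup_add _ _ List.nodup_nil)

-- ===== VERDICT (by name: the statement is the Claim_ definition above) =====
theorem failure_frame_indices_py_spec : Claim_equal_failure_frame_indices_py := by
  intro rr ts _hdom _hpre
  unfold Spec_failure_frame_indices_py failure_frame_indices_py failure_frame_indices_py_alt
  set seed : PySem.Set Int :=
    if rr = [] then PySem.Set.empty
    else PySem.Set.add (PySem.Set.add PySem.Set.empty 0) (PySem.List.len rr - 1) with hseed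
  set anchors : PySem.Set Int := ts.foldl (fun s track_summary =>
      let anchor_frame := pvAnchorFrame track_summary
      if anchor_frame ≥ 0 then PySem.Set.add s anchor_frame else s) PySem.Set.empty with hanch
  set SA : PySem.Set Int := ts.foldl (fun acc track_summary =>
      let anchor_frame := pvAnchorFrame track_summary
      if anchor_frame < 0 then acc
      else
        match pvFirstMatchA rr anchor_frame 0 with
        | some index => PySem.Set.add acc index
        | none => acc) seed with hSA
  set SB : PySem.Set Int := if anchors = [] then seed else pvScanB rr anchors seed 0 with hSB
  have hmem : ∀ x, x ∈ SA ↔ x ∈ SB := by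
    intro x
    rw [hSA, pvA_fold_mem]
    by_cases hA : anchors = []
    · rw [hSB, if_pos hA]
      constructor
      · rintro (hx | ⟨t, ht, hge, hm⟩)
        · exact hx
        · exfalso
          have : pvAnchorFrame t ∈ anchors := by
            rw [hanch, pvB_anchors_mem]
            exact Or.inr ⟨t, ht, not_lt.1 hge, rfl⟩
          simp [hA] at this
      · exact fun hx => Or.inl hx
    · rw [hSB, if_neg hA, pvScanB_mem]
      constructor
      · rintro (hx | ⟨t, ht, hge, hm⟩)
        · exact Or.inl hx
        · refine Or.inr ⟨pvAnchorFrame t, ?_, hm⟩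
          rw [hanch, pvB_anchors_mem]
          exact Or.inr ⟨t, ht, not_lt.1 hge, rfl⟩
      · rintro (hx | ⟨f, hf, hm⟩)
        · exact Or.inl hx
        · rw [hanch, pvB_anchors_mem] at hf
          rcases hf with hf | ⟨t, ht, hge, rfl⟩
          · simp [PySem.Set.empty] at hf
          · exact Or.inr ⟨t, ht, not_lt.2 hge, hm⟩
  have hperm : SA.Perm SB := by
    refine (List.perm_ext_iff_of_nodup ?_ ?_).2 hmem
    · exact pvA_fold_nodup rr ts seed (pvSeed_nodup rr)
    · rw [hSB]
      split
      · exact pvSeed_nodup rr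
      · exact pvScanB_nodup rr anchors seed 0 (pvSeed_nodup rr)
  exact PySem.List.sorted_eq_sorted_of_perm SA SB (fun x => x) (fun a b h => h) hperm
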